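-- pv_equiv track=rewrite | github.com/Almanouille/Predictor-App | models/feature_calculator.py | _calculate_unbeaten_streak
-- ===== SOURCE A (Python) =====
-- from typing import Any, Dict, List, Optional, Tuple
--
-- def _calculate_unbeaten_streak(results: List[str]) -> int:
--     """
--     Calculate unbeaten streak (wins + draws).
--
--     :param results: List of recent results.
--     :return: Unbeaten streak count.
--     """
--     streak = 0
--     #[?] why reversed
--     for result in reversed(results):
--         if result in ['W', 'D']:
--             streak += 1
--         else:
--             break
--     return streak
-- ===== SOURCE B (Python) =====
-- from typing import List
--
-- def _calculate_unbeaten_streak(results: List[str]) -> int: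
--     streak = 0
--     for result in results:
--         if result in ['W', 'D']:
--             streak += 1
--         else:
--             streak = 0
--     return streak
-- ===== Notes on version B (the rewrite author's own statement) =====
-- stated objective: alternative
-- what changed: Forward single pass with a resettable counter (interior losses zero the accumulator) instead of a reversed iteration with an early break.
import Mathlib
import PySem

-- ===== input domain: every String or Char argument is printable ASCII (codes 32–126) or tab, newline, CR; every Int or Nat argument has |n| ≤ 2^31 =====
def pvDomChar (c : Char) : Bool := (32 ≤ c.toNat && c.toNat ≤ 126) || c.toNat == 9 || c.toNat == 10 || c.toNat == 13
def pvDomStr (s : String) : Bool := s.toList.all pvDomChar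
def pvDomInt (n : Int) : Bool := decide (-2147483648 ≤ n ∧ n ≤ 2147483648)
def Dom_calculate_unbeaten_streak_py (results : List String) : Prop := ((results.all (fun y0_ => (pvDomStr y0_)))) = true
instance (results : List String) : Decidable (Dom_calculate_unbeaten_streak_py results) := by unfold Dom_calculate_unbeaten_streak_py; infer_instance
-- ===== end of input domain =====

-- B counts the trailing W/D run with a forward pass and a resettable counter instead of A's reversed loop with break.


-- ===== PORT A =====
-- helper: counts leading W/D of the (already reversed) list, stopping at the first other result (the `break`)
def pvPrefixWD : List String → Int
  | [] => 0
  | x :: xs => if x = "W" ∨ x = "D" then 1 + pvPrefixWD xs else 0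

def calculate_unbeaten_streak_py (results : List String) : Int :=
  pvPrefixWD results.reverse

-- ===== PORT B =====
def calculate_unbeaten_streak_py_alt (results : List String) : Int :=
  results.foldl (fun streak result => if result = "W" ∨ result = "D" then streak + 1 else 0) 0

-- ===== PRECONDITION & SPEC =====
def Spec_calculate_unbeaten_streak_py (results : List String) (out : Int) : Prop := out = calculate_unbeaten_streak_py_alt results
instance (results : List String) (out : Int) : Decidable (Spec_calculate_unbeaten_streak_py results out) := by unfold Spec_calculate_unbeaten_streak_py; infer_instance

-- ===== CLAIM (what is proved, stated in full; the proofs are below) =====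
def Claim_equal_calculate_unbeaten_streak_py : Prop := ∀ (results : List String), Dom_calculate_unbeaten_streak_py results → Spec_calculate_unbeaten_streak_py results (calculate_unbeaten_streak_py results)

-- ===== LEMMAS AND PROOFS =====

-- ===== VERDICT (by name: the statement is the Claim_ definition above) =====
lemma pv_foldl_eq_prefix (l : List String) :
    l.foldl (fun streak result => if result = "W" ∨ result = "D" then streak + 1 else 0) 0
      = pvPrefixWD l.reverse := by
  induction l using List.reverseRecOn with
  | nil => simp [pvPrefixWD]
  | append_singleton l x ih =>
      rw [List.foldl_append, List.foldl_cons, List.foldl_nil, List.reverse_append]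
      simp only [List.reverse_singleton, List.singleton_append, pvPrefixWD, ih]
      split_ifs <;> omega

theorem calculate_unbeaten_streak_py_spec : Claim_equal_calculate_unbeaten_streak_py := by
  intro results _
  unfold Spec_calculate_unbeaten_streak_py calculate_unbeaten_streak_py calculate_unbeaten_streak_py_alt
  exact (pv_foldl_eq_prefix results).symm
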